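-- pv_equiv track=rewrite | github.com/MonsterGuti/functions | Functions-exercises/Odd_and_Even_sum.py | odd_and_even_sum
-- ===== SOURCE A (Python) =====
-- def odd_and_even_sum(a):
--     sum_of_even_digits = sum_of_odd_digits = 0
--     for char in str(a):
--         num = int(char)
--         if num % 2 == 0:
--             sum_of_even_digits += num
--         elif num % 2 != 0:
--             sum_of_odd_digits += num
--     return f"Odd sum = {sum_of_odd_digits}, Even sum = {sum_of_even_digits}"
-- ===== SOURCE B (Python) =====
-- def odd_and_even_sum(a):
--     odd = even = 0
--     n = a
--     while n > 0:
--         n, d = divmod(n, 10)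
--         if d % 2 == 1:
--             odd += d
--         else:
--             even += d
--     return f"Odd sum = {odd}, Even sum = {even}"
-- ===== Notes on version B (the rewrite author's own statement) =====
-- stated objective: alternative
-- what changed: B extracts digits arithmetically with divmod(n, 10) in a loop instead of converting the number to a string and parsing each character back with int().
import Mathlib
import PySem

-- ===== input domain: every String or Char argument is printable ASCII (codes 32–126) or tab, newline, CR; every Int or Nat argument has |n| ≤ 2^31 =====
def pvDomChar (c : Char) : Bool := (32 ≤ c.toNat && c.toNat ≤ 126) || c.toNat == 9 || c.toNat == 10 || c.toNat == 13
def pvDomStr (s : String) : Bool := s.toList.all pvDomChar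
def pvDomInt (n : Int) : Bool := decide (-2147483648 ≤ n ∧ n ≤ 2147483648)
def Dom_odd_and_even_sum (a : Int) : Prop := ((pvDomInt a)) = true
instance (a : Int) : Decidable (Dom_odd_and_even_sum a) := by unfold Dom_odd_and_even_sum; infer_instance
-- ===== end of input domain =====

-- B sums the digits by arithmetic divmod(n, 10) instead of A's str(a)/int(char) round-trip; return values agree on all a ≥ 0.

-- ===== PORT A =====
-- one loop iteration of A: num = int(char); add to the even (first) or odd (second) accumulator
def stepA (s : Int × Int) (c : Char) : Int × Int :=
  let num := (PySem.Int.ofChars? [c]).getD 0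
  if PySem.Int.mod num 2 = 0 then (s.1 + num, s.2) else (s.1, s.2 + num)

def odd_and_even_sum (a : Int) : String :=
  let s := (PySem.Int.toChars a).foldl stepA (0, 0)
  String.ofList ("Odd sum = ".toList ++ PySem.Int.toChars s.2 ++ ", Even sum = ".toList ++ PySem.Int.toChars s.1)

-- ===== PORT B =====
-- the while-loop of B: state (odd, even), n, d = divmod(n, 10)
def sumLoop (n odd even : Int) : Int × Int :=
  if h : 0 < n then
    let d := PySem.Int.mod n 10
    let n' := PySem.Int.floordiv n 10
    if PySem.Int.mod d 2 = 1 then sumLoop n' (odd + d) even else sumLoop n' odd (even + d)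
  else (odd, even)
termination_by n.toNat
decreasing_by
  all_goals
    have hn0 : 0 ≤ n := le_of_lt h
    have hcast : ((n.toNat : Int)) = n := Int.toNat_of_nonneg hn0
    have hfd : PySem.Int.floordiv n 10 = ((n.toNat / 10 : Nat) : Int) := by
      rw [← hcast]; exact_mod_cast PySem.Int.floordiv_natCast n.toNat 10
    rw [hfd]
    have := Nat.div_lt_self (show 0 < n.toNat by omega) (show 1 < 10 by omega)
    omega

def odd_and_even_sum_alt (a : Int) : String :=
  let s := sumLoop a 0 0
  String.ofList ("Odd sum = ".toList ++ PySem.Int.toChars s.1 ++ ", Even sum = ".toList ++ PySem.Int.toChars s.2)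

-- ===== PRECONDITION & SPEC =====
-- Pre_ excludes negative a, where Python A raises ValueError (int('-')); A returns on all a ≥ 0.
def Pre_odd_and_even_sum (a : Int) : Prop := 0 ≤ a
instance (a : Int) : Decidable (Pre_odd_and_even_sum a) := by unfold Pre_odd_and_even_sum; infer_instance
def pvWitness_odd_and_even_sum : Int := (123)

def Spec_odd_and_even_sum (a : Int) (out : String) : Prop := out = odd_and_even_sum_alt a
instance (a : Int) (out : String) : Decidable (Spec_odd_and_even_sum a out) := by unfold Spec_odd_and_even_sum; infer_instance

-- ===== CLAIM (what is proved, stated in full; the proofs are below) =====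
def Claim_equal_odd_and_even_sum : Prop := ∀ (a : Int), Dom_odd_and_even_sum a → Pre_odd_and_even_sum a → Spec_odd_and_even_sum a (odd_and_even_sum a)

-- ===== LEMMAS AND PROOFS =====

-- the value A parses back out of one digit character
lemma ofChars_digitChar (d : Nat) (hd : d < 10) :
    (PySem.Int.ofChars? [Nat.digitChar d]).getD 0 = (d : Int) := by
  interval_cases d <;> decide

lemma mod_cast_two (d : Nat) : PySem.Int.mod (d : Int) 2 = ((d % 2 : Nat) : Int) := by
  exact_mod_cast PySem.Int.mod_natCast d 2

lemma stepA_digit (d : Nat) (hd : d < 10) (s : Int × Int) :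
    stepA s (Nat.digitChar d) =
      if d % 2 = 0 then (s.1 + d, s.2) else (s.1, s.2 + d) := by
  simp only [stepA, ofChars_digitChar d hd, mod_cast_two]
  by_cases h : d % 2 = 0 <;> simp [h] <;> omega

-- sumLoop on a natural number, with the cast arithmetic done
lemma sumLoop_natCast (m : Nat) (o e : Int) (hm : 0 < m) :
    sumLoop (m : Int) o e =
      (if m % 10 % 2 = 1
        then sumLoop ((m / 10 : Nat) : Int) (o + (m % 10 : Nat)) e
        else sumLoop ((m / 10 : Nat) : Int) o (e + (m % 10 : Nat))) := by
  rw [sumLoop]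
  have h0 : (0:Int) < (m:Int) := by exact_mod_cast hm
  rw [dif_pos h0]
  have hmod : PySem.Int.mod (m : Int) 10 = ((m % 10 : Nat) : Int) := by
    exact_mod_cast PySem.Int.mod_natCast m 10
  have hdiv : PySem.Int.floordiv (m : Int) 10 = ((m / 10 : Nat) : Int) := by
    exact_mod_cast PySem.Int.floordiv_natCast m 10
  simp only [hmod, hdiv, mod_cast_two]
  by_cases h : m % 10 % 2 = 1
  · have h1 : (m : Int) % 2 = 1 := by omega
    have h2 : m % 2 = 1 := by omega
    simp [h, h1, h2]
  · have h1 : ¬ (m : Int) % 2 = 1 := by omega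
    have h2 : ¬ m % 2 = 1 := by omega
    simp [h, h1, h2]

-- the accumulators are pure offsets
lemma sumLoop_shift : ∀ (m : Nat) (o e : Int),
    sumLoop (m : Int) o e = (o + (sumLoop (m : Int) 0 0).1, e + (sumLoop (m : Int) 0 0).2) := by
  intro m
  induction m using Nat.strong_induction_on with
  | _ m ih =>
    intro o e
    by_cases hm : 0 < m
    · have hlt : m / 10 < m := Nat.div_lt_self hm (by omega)
      rw [sumLoop_natCast m o e hm, sumLoop_natCast m 0 0 hm]
      by_cases h : m % 10 % 2 = 1
      · rw [if_pos h, if_pos h, ih _ hlt (o + _) e, ih _ hlt (0 + ((m % 10 : Nat) : Int)) 0]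
        simp only [Prod.mk.injEq]
        constructor <;> ring
      · rw [if_neg h, if_neg h, ih _ hlt o (e + _), ih _ hlt 0 (0 + ((m % 10 : Nat) : Int))]
        simp only [Prod.mk.injEq]
        constructor <;> ring
    · have : m = 0 := by omega
      subst this
      rw [sumLoop, sumLoop]
      norm_num

-- A's fold over the digit characters of n computes B's digit sums
lemma foldA_toDigitsCore : ∀ (fuel n : Nat) (ds : List Char) (e o : Int), n < fuel →
    (Nat.toDigitsCore 10 fuel n ds).foldl stepA (e, o) =
      ds.foldl stepA (e + (sumLoop (n : Int) 0 0).2, o + (sumLoop (n : Int) 0 0).1) := by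
  intro fuel
  induction fuel with
  | zero => intro n ds e o h; omega
  | succ fuel ih =>
    intro n ds e o h
    have hd10 : n % 10 < 10 := Nat.mod_lt _ (by omega)
    by_cases hq : n / 10 = 0
    · -- last digit
      simp only [Nat.toDigitsCore, hq, if_pos, List.foldl_cons]
      by_cases hn : n = 0
      · subst hn
        rw [sumLoop]
        simp [stepA_digit 0 (by omega)]
      · rw [sumLoop_natCast n 0 0 (by omega), hq]
        rw [stepA_digit (n % 10) hd10]
        by_cases hpar : n % 10 % 2 = 1
        · rw [if_pos hpar, if_neg (by omega)]
          rw [sumLoop]; norm_num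
        · rw [if_neg hpar, if_pos (by omega)]
          rw [sumLoop]; norm_num
    · -- more digits above
      have hn : 0 < n := by
        rcases Nat.eq_zero_or_pos n with h0 | h0
        · exfalso; apply hq; simp [h0]
        · exact h0
      have hlt : n / 10 < fuel := by
        have := Nat.div_lt_self hn (show 1 < 10 by omega)
        omega
      simp only [Nat.toDigitsCore, hq, if_neg, if_false]
      rw [ih (n / 10) (Nat.digitChar (n % 10) :: ds) e o hlt]
      simp only [List.foldl_cons]
      rw [stepA_digit (n % 10) hd10]
      rw [sumLoop_natCast n 0 0 hn]
      by_cases hpar : n % 10 % 2 = 1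
      · rw [if_pos hpar, if_neg (by omega)]
        rw [sumLoop_shift (n / 10) (0 + (n % 10 : Nat)) 0]
        simp
        ring_nf
      · rw [if_neg hpar, if_pos (by omega)]
        rw [sumLoop_shift (n / 10) 0 (0 + (n % 10 : Nat))]
        simp
        ring_nf

-- ===== VERDICT (by name: the statement is the Claim_ definition above) =====
theorem odd_and_even_sum_spec : Claim_equal_odd_and_even_sum := by
  intro a _ hPre
  have h0 : 0 ≤ a := hPre
  unfold Spec_odd_and_even_sum odd_and_even_sum odd_and_even_sum_alt
  have hts : PySem.Int.toChars a = Nat.toDigits 10 a.toNat := by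
    simp [PySem.Int.toChars]
    intro h; omega
  rw [hts]
  have hcast : ((a.toNat : Int)) = a := Int.toNat_of_nonneg h0
  have := foldA_toDigitsCore (a.toNat + 1) a.toNat [] 0 0 (by omega)
  rw [Nat.toDigits] at *
  rw [this, hcast]
  simp
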